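-- pv_equiv track=rewrite | github.com/scuty31/daily_coding_test | programmers_42626.py | solution
-- ===== SOURCE A (Python) =====
-- import heapq
--
-- def solution(scoville, K):
--     q = []
--     answer = 0
--
--     # 최소 힙에 스코빌 지수 저장
--     heapq.heapify(scoville)
--
--     # 스코빌 지수를 비교하고 섞는다.
--     while True:
--         min_scoville = heapq.heappop(scoville)  # 가장 맵지 않은 음식의 스코빌 지수
--
--         # 가장 맵지 않은 음식의 스코빌 지수가 K보다 크다면 섞는 것을 그만둔다.
--         if min_scoville >= K:
--             break
--
--         # 더이상 스코빌 지수를 K 이상 만들 수 없다면 그만둔다.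
--         if len(scoville) == 0:
--             answer = -1
--             break
--
--         second_min_scoville = heapq.heappop(scoville)  # 두 번째로 맵지 않은 음식의 스코빌 지수
--
--         # 섞은 스코빌 지수를 다시 최소 힙에 저장
--         heapq.heappush(scoville, min_scoville + (second_min_scoville * 2))
--         answer += 1  # count 증가
--
--     return answer
-- ===== SOURCE B (Python) =====
-- def solution(scoville, K):
--     # Two-queue merge (the classic O(1)-per-mix trick): sort once into q1; every
--     # mixed value is >= every value still waiting in q2, so appending to the
--     # plain list q2 keeps it sorted and the global minimum is always one of the
--     # two queue heads.  No heap and no ordered insertion.  Return value only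
--     # (A heapifies its argument in place; B leaves it untouched).
--     q1 = sorted(scoville)
--     q2 = []
--     i = j = 0
--     answer = 0
--
--     def pop():
--         nonlocal i, j
--         if i < len(q1) and (j >= len(q2) or q1[i] <= q2[j]):
--             v = q1[i]
--             i += 1
--         else:
--             v = q2[j]
--             j += 1
--         return v
--
--     while True:
--         m = pop()
--         if m >= K:
--             break
--         if (len(q1) - i) + (len(q2) - j) == 0:
--             answer = -1
--             break
--         n = pop()
--         q2.append(m + 2 * n)
--         answer += 1
--     return answer
-- ===== Notes on version B (the rewrite author's own statement) =====
-- stated objective: faster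
-- what changed: Replaces the priority queue entirely with the two-queue merge trick: sort once, then take minima from the heads of the sorted originals and a FIFO of mixed values (the mixed values are monotone, so a plain append keeps the FIFO sorted) - no heap and no ordered insertion, O(1) per mix after the sort.
import Mathlib
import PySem

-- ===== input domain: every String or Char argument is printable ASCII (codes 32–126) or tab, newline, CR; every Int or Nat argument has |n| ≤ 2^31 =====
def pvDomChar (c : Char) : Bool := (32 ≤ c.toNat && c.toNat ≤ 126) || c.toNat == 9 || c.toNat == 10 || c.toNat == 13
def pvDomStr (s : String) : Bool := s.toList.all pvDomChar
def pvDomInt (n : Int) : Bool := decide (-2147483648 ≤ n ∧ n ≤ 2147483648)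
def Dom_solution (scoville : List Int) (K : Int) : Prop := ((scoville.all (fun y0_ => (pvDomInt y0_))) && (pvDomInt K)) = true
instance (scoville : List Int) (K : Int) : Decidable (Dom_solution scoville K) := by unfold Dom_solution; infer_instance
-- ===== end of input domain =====

-- B replaces A's binary min-heap with the two-queue merge trick (sorted input
-- queue + FIFO of mixed values); equal RETURN value only: A heap-orders its
-- argument in place, B leaves it untouched.

-- ===== PORT A =====
-- heapq model: heappop returns the minimum of the multiset and removes one
-- occurrence of it; heappush adds the value.  Only the multiset of heap
-- contents and the popped minima determine A's return value, so this is exact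
-- for the returned answer.
def pvMin (x : Int) (xs : List Int) : Int := xs.foldl min x

-- the while-True loop; fuel = len+1 is always enough (each mix shrinks the heap by 1)
def solutionGo : Nat → List Int → Int → Int → Int
  | 0, _, _, _ => 0
  | fuel + 1, l, K, ans =>
    match l with
    | [] => 0  -- heappop from an empty heap: IndexError, excluded by Pre_solution
    | x :: xs =>
      let m := pvMin x xs                    -- min_scoville = heapq.heappop(scoville)
      if K ≤ m then ans                      -- if min_scoville >= K: break
      else
        match (x :: xs).erase m with         -- remaining heap contents
        | [] => -1                           -- if len(scoville) == 0: answer = -1; break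
        | y :: ys =>                         -- second_min_scoville = heapq.heappop(...)
          solutionGo fuel ((m + (pvMin y ys) * 2) :: ((y :: ys).erase (pvMin y ys))) K (ans + 1)

def solution (scoville : List Int) (K : Int) : Int :=
  solutionGo (scoville.length + 1) scoville K 0

-- ===== PORT B =====
-- pop(): take the smaller of the two queue heads (advance = drop the head)
def popB : List Int → List Int → Int × List Int × List Int
  | [], [] => (0, [], [])                    -- pop from two empty queues: IndexError, excluded by Pre_solution
  | [], b :: bs => (b, [], bs)
  | a :: as_, [] => (a, as_, [])
  | a :: as_, b :: bs => if a ≤ b then (a, as_, b :: bs) else (b, a :: as_, bs)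

def solutionAltGo : Nat → List Int → List Int → Int → Int → Int
  | 0, _, _, _, _ => 0
  | fuel + 1, q1, q2, K, ans =>
    if q1.length + q2.length = 0 then 0            -- pop from two empty queues: IndexError, excluded by Pre_solution
    else
      match popB q1 q2 with
      | (m, q1', q2') =>
        if K ≤ m then ans                            -- if m >= K: break
        else if q1'.length + q2'.length = 0 then -1  -- nothing left to mix with
        else
          match popB q1' q2' with
          | (n, q1'', q2'') =>
            solutionAltGo fuel q1'' (q2'' ++ [m + 2 * n]) K (ans + 1)  -- q2.append(m + 2*n)

def solution_alt (scoville : List Int) (K : Int) : Int :=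
  solutionAltGo (scoville.length + 1) (scoville.mergeSort (· ≤ ·)) [] K 0

-- ===== PRECONDITION & SPEC =====
-- Pre_ excludes only the empty list, on which A raises IndexError (heappop from an empty heap).
def Pre_solution (scoville : List Int) (_K : Int) : Prop := scoville ≠ []
instance (scoville : List Int) (K : Int) : Decidable (Pre_solution scoville K) := by unfold Pre_solution; infer_instance
def pvWitness_solution : List Int × Int := ([1, 2, 3, 9, 10, 12], 7)

def Spec_solution (scoville : List Int) (K : Int) (out : Int) : Prop := out = solution_alt scoville K
instance (scoville : List Int) (K : Int) (out : Int) : Decidable (Spec_solution scoville K out) := by unfold Spec_solution; infer_instance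

-- ===== CLAIM (what is proved, stated in full; the proofs are below) =====
def Claim_equal_solution : Prop := ∀ (scoville : List Int) (K : Int), Dom_solution scoville K → Pre_solution scoville K → Spec_solution scoville K (solution scoville K)

-- ===== LEMMAS AND PROOFS =====

-- the mixed value of the two smallest elements of a list (junk below length 2)
def minpair (l : List Int) : Int :=
  match l with
  | [] => 0
  | x :: xs =>
    match (x :: xs).erase (pvMin x xs) with
    | [] => 0
    | y :: ys => pvMin x xs + 2 * pvMin y ys

theorem pvMin_mem (x : Int) (xs : List Int) : pvMin x xs ∈ x :: xs := by
  induction xs generalizing x with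
  | nil => simp [pvMin]
  | cons y ys ih =>
    have h := ih (min x y)
    simp only [pvMin, List.foldl_cons] at h ⊢
    rcases List.mem_cons.mp h with h | h
    · rw [h]; rcases min_choice x y with hm | hm <;> simp [hm]
    · simp [h]

theorem pvMin_le (x : Int) (xs : List Int) : ∀ a ∈ x :: xs, pvMin x xs ≤ a := by
  induction xs generalizing x with
  | nil => intro a ha; simp at ha; simp [pvMin, ha]
  | cons y ys ih =>
    intro a ha
    have h := ih (min x y)
    simp only [pvMin, List.foldl_cons] at h ⊢
    rcases List.mem_cons.mp ha with rfl | ha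
    · exact le_trans (h _ (List.mem_cons_self)) (min_le_left _ _)
    · rcases List.mem_cons.mp ha with rfl | ha
      · exact le_trans (h _ (List.mem_cons_self)) (min_le_right _ _)
      · exact h _ (List.mem_cons_of_mem _ ha)

theorem pvMin_eq (x : Int) (xs : List Int) (m : Int) (hm : m ∈ x :: xs)
    (hle : ∀ a ∈ x :: xs, m ≤ a) : pvMin x xs = m :=
  le_antisymm (pvMin_le x xs m hm) (hle _ (pvMin_mem x xs))

theorem minpair_eq (L : List Int) (m n : Int) (hm : m ∈ L) (hmle : ∀ a ∈ L, m ≤ a)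
    (hn : n ∈ L.erase m) (hnle : ∀ a ∈ L.erase m, n ≤ a) : minpair L = m + 2 * n := by
  match L with
  | [] => cases hm
  | x :: xs =>
    have h1 : pvMin x xs = m := pvMin_eq x xs m hm hmle
    simp only [minpair]
    rw [h1]
    split
    · next heq => rw [heq] at hn; cases hn
    · next y ys heq =>
      rw [heq] at hn hnle
      rw [pvMin_eq y ys n hn hnle]

theorem minpair_ge (L : List Int) (c : Int) (hlen : 2 ≤ L.length)
    (hc : ∀ a ∈ L, c ≤ a) : 3 * c ≤ minpair L := by
  match L with
  | [] => simp at hlen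
  | x :: xs =>
    simp only [minpair]
    split
    · next heq =>
      have h2 := List.length_erase_of_mem (pvMin_mem x xs)
      rw [heq] at h2
      simp only [List.length_nil, List.length_cons] at h2 hlen
      omega
    · next y ys heq =>
      have hp : c ≤ pvMin x xs := hc _ (pvMin_mem x xs)
      have hq : c ≤ pvMin y ys := by
        have : pvMin y ys ∈ (x :: xs).erase (pvMin x xs) := by
          rw [heq]; exact pvMin_mem y ys
        exact hc _ (List.mem_of_mem_erase this)
      linarith

theorem minpair_bound (L : List Int) (hlen : 2 ≤ L.length) (u n b : Int)
    (helem : ∀ p ∈ L, p = u ∨ n ≤ p) (hn : 0 ≤ n) (hb : b ≤ u) (hnb : n ≤ b)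
    (hu3 : u ≤ 3 * n) : b ≤ minpair L := by
  match L with
  | [] => simp at hlen
  | x :: xs =>
    simp only [minpair]
    split
    · next heq =>
      have h2 := List.length_erase_of_mem (pvMin_mem x xs)
      rw [heq] at h2
      simp only [List.length_nil, List.length_cons] at h2 hlen
      omega
    · next y ys heq =>
      have hp : pvMin x xs = u ∨ n ≤ pvMin x xs := helem _ (pvMin_mem x xs)
      have hq : pvMin y ys = u ∨ n ≤ pvMin y ys := by
        have : pvMin y ys ∈ (x :: xs).erase (pvMin x xs) := by
          rw [heq]; exact pvMin_mem y ys
        exact helem _ (List.mem_of_mem_erase this)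
      rcases hp with hp | hp <;> rcases hq with hq | hq <;> linarith

theorem mem_erase_of_perm_cons {a x : Int} {l t : List Int}
    (hp : l.Perm (x :: t)) (ha : a ∈ t) : x ∈ l.erase a := by
  by_cases hax : a = x
  · subst hax
    have hc : 2 ≤ l.count a := by
      have := hp.count_eq a
      simp at this
      have := List.count_pos_iff.mpr ha
      omega
    have : 0 < (l.erase a).count a := by
      rw [List.count_erase_self]; omega
    exact List.count_pos_iff.mp this
  · exact (List.mem_erase_of_ne (fun h => hax h.symm)).mpr
      (hp.mem_iff.mpr (List.mem_cons_self))

theorem popB_spec (q1 q2 : List Int) (h1 : q1.Pairwise (· ≤ ·)) (h2 : q2.Pairwise (· ≤ ·))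
    (hne : q1 ++ q2 ≠ []) :
    (q1 ++ q2).Perm ((popB q1 q2).1 :: ((popB q1 q2).2.1 ++ (popB q1 q2).2.2)) ∧
    (∀ a ∈ q1 ++ q2, (popB q1 q2).1 ≤ a) ∧
    (popB q1 q2).2.1.Pairwise (· ≤ ·) ∧ (popB q1 q2).2.2.Pairwise (· ≤ ·) ∧
    (popB q1 q2).2.1 <:+ q1 ∧ (popB q1 q2).2.2 <:+ q2 := by
  match q1, q2 with
  | [], [] => simp at hne
  | [], b :: bs =>
    refine ⟨by simp [popB], ?_, by simp [popB], (List.pairwise_cons.mp h2).2, by simp [popB], by simp [popB]⟩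
    intro a ha
    simp [popB] at ha ⊢
    rcases ha with rfl | ha
    · exact le_refl _
    · exact (List.pairwise_cons.mp h2).1 a ha
  | x :: xs, [] =>
    refine ⟨by simp [popB], ?_, (List.pairwise_cons.mp h1).2, by simp [popB], by simp [popB], by simp [popB]⟩
    intro a ha
    simp [popB] at ha ⊢
    rcases ha with rfl | ha
    · exact le_refl _
    · exact (List.pairwise_cons.mp h1).1 a ha
  | x :: xs, b :: bs =>
    obtain ⟨hx, hxs⟩ := List.pairwise_cons.mp h1
    obtain ⟨hb, hbs⟩ := List.pairwise_cons.mp h2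
    by_cases hcmp : x ≤ b
    · simp only [popB, if_pos hcmp]
      refine ⟨by simp, ?_, hxs, h2, List.suffix_cons x xs, List.suffix_refl _⟩
      intro a ha
      simp at ha
      rcases ha with rfl | ha | rfl | ha
      · exact le_refl _
      · exact hx a ha
      · exact hcmp
      · exact le_trans hcmp (hb a ha)
    · simp only [popB, if_neg hcmp]
      have hbx : b ≤ x := le_of_lt (lt_of_not_ge hcmp)
      refine ⟨?_, ?_, h1, hbs, List.suffix_refl _, List.suffix_cons b bs⟩
      · simpa using (List.perm_middle (a := b) (l₁ := x :: xs) (l₂ := bs))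
      · intro a ha
        simp at ha
        rcases ha with rfl | ha | rfl | ha
        · exact hbx
        · exact le_trans hbx (hx a ha)
        · exact le_refl _
        · exact hb a ha

theorem go_eq (fuel : Nat) : ∀ (l q1 q2 : List Int) (K ans : Int),
    l.Perm (q1 ++ q2) → q1.Pairwise (· ≤ ·) → q2.Pairwise (· ≤ ·) →
    (∀ a ∈ q2, 2 ≤ (q1 ++ q2.erase a).length → a ≤ minpair (q1 ++ q2.erase a)) →
    solutionGo fuel l K ans = solutionAltGo fuel q1 q2 K ans := by
  induction fuel with
  | zero => intro l q1 q2 K ans _ _ _ _; rfl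
  | succ fuel ih =>
    intro l q1 q2 K ans hp h1 h2 hinv
    by_cases hq : q1.length + q2.length = 0
    · -- both queues empty ⇒ the heap is empty too; both ports return 0
      have hqe : q1 ++ q2 = [] := by
        have h0 : (q1 ++ q2).length = 0 := by rw [List.length_append]; exact hq
        exact List.length_eq_zero_iff.mp h0
      have hl : l = [] := (hp.trans (hqe ▸ List.Perm.refl _)).eq_nil
      subst hl
      simp [solutionGo, solutionAltGo, hq]
    · have hne : q1 ++ q2 ≠ [] := by
        intro h; apply hq; rw [← List.length_append, h]; rfl
      cases l with
      | nil => exact absurd hp.symm.eq_nil hne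
      | cons x xs =>
      rcases hpb : popB q1 q2 with ⟨m, q1', q2'⟩
      have spec := popB_spec q1 q2 h1 h2 hne
      rw [hpb] at spec
      dsimp only at spec
      obtain ⟨hpm, hlbm, hs1', hs2', hsf1, hsf2⟩ := spec
      -- the popped value is the heap minimum
      have hmA : pvMin x xs = m :=
        pvMin_eq x xs m (hp.mem_iff.mpr (hpm.mem_iff.mpr List.mem_cons_self))
          (fun a ha => hlbm a (hp.subset ha))
      simp only [solutionGo, solutionAltGo, if_neg hq, hpb, hmA]
      by_cases hk : K ≤ m
      · simp [hk]
      · simp only [if_neg hk]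
        -- the rest of the heap matches the rest of the queues
        have hQm : ((q1 ++ q2).erase m).Perm (q1' ++ q2') := by
          have := hpm.erase m
          rwa [List.erase_cons_head] at this
        have hEm : ((x :: xs).erase m).Perm (q1' ++ q2') := (hp.erase m).trans hQm
        cases hEq : (x :: xs).erase m with
        | nil =>
          have : q1' ++ q2' = [] := (hEq ▸ hEm).symm.eq_nil
          have hz : q1'.length + q2'.length = 0 := by
            rw [← List.length_append, this]; rfl
          simp [hz]
        | cons y ys =>
          have hne2 : q1' ++ q2' ≠ [] := by
            intro h
            rw [hEq] at hEm
            exact absurd (hEm.trans (h ▸ List.Perm.refl _)).eq_nil (by simp)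
          have hz : ¬ (q1'.length + q2'.length = 0) := by
            intro h; apply hne2
            exact List.length_eq_zero_iff.mp (by rw [List.length_append]; omega)
          simp only [if_neg hz]
          rcases hpb2 : popB q1' q2' with ⟨n, q1'', q2''⟩
          have spec2 := popB_spec q1' q2' hs1' hs2' hne2
          rw [hpb2] at spec2
          dsimp only at spec2
          obtain ⟨hpn, hlbn, hs1'', hs2'', hsf1', hsf2'⟩ := spec2
          rw [hEq] at hEm
          -- the second popped value is the second minimum
          have hnA : pvMin y ys = n :=
            pvMin_eq y ys n (hEm.mem_iff.mpr (hpn.mem_iff.mpr List.mem_cons_self))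
              (fun a ha => hlbn a (hEm.subset ha))
          rw [hnA]
          have hval : m + n * 2 = m + 2 * n := by ring
          rw [hval]
          -- membership plumbing
          have hsub2 : ∀ c, c ∈ q1'' ++ q2'' → c ∈ q1' ++ q2' := by
            intro c hc
            rcases List.mem_append.mp hc with h | h
            · exact List.mem_append_left _ (hsf1'.sublist.subset h)
            · exact List.mem_append_right _ (hsf2'.sublist.subset h)
          have hsub1 : ∀ c, c ∈ q1' ++ q2' → c ∈ q1 ++ q2 := by
            intro c hc
            rcases List.mem_append.mp hc with h | h
            · exact List.mem_append_left _ (hsf1.sublist.subset h)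
            · exact List.mem_append_right _ (hsf2.sublist.subset h)
          have hmn : m ≤ n :=
            hlbm n (hsub1 n (hpn.mem_iff.mpr List.mem_cons_self))
          -- lengths
          have hlen1 : q1.length + q2.length = 1 + (q1'.length + q2'.length) := by
            have := hpm.length_eq; simp [List.length_append] at this; omega
          have hlen2 : q1'.length + q2'.length = 1 + (q1''.length + q2''.length) := by
            have := hpn.length_eq; simp [List.length_append] at this; omega
          -- every survivor of q2 is at most the mixed value m + 2n
          have hkey : ∀ a ∈ q2'', a ≤ m + 2 * n := by
            intro a ha
            have ha1 : a ∈ q2' := hsf2'.sublist.subset ha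
            have ha0 : a ∈ q2 := hsf2.sublist.subset ha1
            have haQ2 : a ∈ q1' ++ q2' := List.mem_append_right _ ha1
            have haQ : a ∈ q1 ++ q2 := hsub1 a haQ2
            -- the list the invariant talks about, as a multiset
            have hL : (q1 ++ q2.erase a).Perm ((q1 ++ q2).erase a) := by
              have c1 : ((q1 ++ q2).erase a).Perm ((q2 ++ q1).erase a) :=
                (List.perm_append_comm).erase a
              rw [List.erase_append_left _ ha0] at c1
              exact ((c1.trans List.perm_append_comm).symm)
            have hlenL : 2 ≤ (q1 ++ q2.erase a).length := by
              have h4 := List.length_erase_of_mem ha0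
              have h5 : 0 < q2.length := List.length_pos_of_mem ha0
              have h6 : 0 < q2''.length := List.length_pos_of_mem ha
              rw [List.length_append, h4]
              omega
            have hmem_m : m ∈ q1 ++ q2.erase a :=
              hL.mem_iff.mpr (mem_erase_of_perm_cons hpm haQ2)
            have hlb_m : ∀ b ∈ q1 ++ q2.erase a, m ≤ b := by
              intro b hb
              exact hlbm b (List.mem_of_mem_erase (hL.subset hb))
            have hchain : ((q1 ++ q2.erase a).erase m).Perm ((q1' ++ q2').erase a) := by
              have c2 := hL.erase m
              rw [List.erase_comm] at c2
              exact c2.trans (hQm.erase a)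
            have hmem_n : n ∈ (q1 ++ q2.erase a).erase m :=
              hchain.mem_iff.mpr (mem_erase_of_perm_cons hpn (List.mem_append_right _ ha))
            have hlb_n : ∀ b ∈ (q1 ++ q2.erase a).erase m, n ≤ b := by
              intro b hb
              exact hlbn b (List.mem_of_mem_erase (hchain.subset hb))
            have := hinv a ha0 hlenL
            rwa [minpair_eq _ m n hmem_m hlb_m hmem_n hlb_n] at this
          refine ih _ q1'' (q2'' ++ [m + 2 * n]) K (ans + 1) ?_ hs1'' ?_ ?_
          · -- multiset invariant for the next state
            have e1 : ((y :: ys).erase n).Perm (q1'' ++ q2'') := by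
              have := (hEm.erase n).trans (hpn.erase n)
              rwa [List.erase_cons_head] at this
            refine (e1.cons _).trans ?_
            have := (List.perm_middle (a := m + 2 * n) (l₁ := q1'' ++ q2'') (l₂ := ([] : List Int))).symm
            simpa [List.append_assoc] using this
          · -- the new FIFO is still sorted
            rw [List.pairwise_append]
            refine ⟨hs2'', by simp, ?_⟩
            intro a ha b hb
            rw [List.mem_singleton] at hb
            subst hb
            exact hkey a ha
          · -- the invariant for the next state
            intro b hb hlenb
            have hu3 : m + 2 * n ≤ 3 * n := by linarith
            have helem : ∀ p ∈ q1'' ++ (q2'' ++ [m + 2 * n]).erase b,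
                p = m + 2 * n ∨ n ≤ p := by
              intro p hpmem
              rcases List.mem_append.mp hpmem with h | h
              · exact Or.inr (hlbn p (hsub2 p (List.mem_append_left _ h)))
              · rcases List.mem_append.mp (List.mem_of_mem_erase h) with h | h
                · exact Or.inr (hlbn p (hsub2 p (List.mem_append_right _ h)))
                · exact Or.inl (List.mem_singleton.mp h)
            rcases List.mem_append.mp hb with hb2 | hbu
            · -- a kept element of the FIFO
              have hbu : b ≤ m + 2 * n := hkey b hb2
              have hnb : n ≤ b := hlbn b (hsub2 b (List.mem_append_right _ hb2))
              by_cases hn0 : 0 ≤ n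
              · exact minpair_bound _ hlenb (m + 2 * n) n b helem hn0 hbu hnb hu3
              · exfalso; linarith [lt_of_not_ge hn0]
            · -- the freshly appended mixed value
              rw [List.mem_singleton] at hbu
              subst hbu
              by_cases hu2 : m + 2 * n ∈ q2''
              · have hnu : n ≤ m + 2 * n :=
                  hlbn _ (hsub2 _ (List.mem_append_right _ hu2))
                by_cases hn0 : 0 ≤ n
                · exact minpair_bound _ hlenb (m + 2 * n) n (m + 2 * n) helem hn0
                    (le_refl _) hnu hu3
                · exfalso; linarith [lt_of_not_ge hn0]
              · have he : (q2'' ++ [m + 2 * n]).erase (m + 2 * n) = q2'' := by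
                  rw [List.erase_append_right _ hu2]
                  simp
                rw [he] at hlenb ⊢
                have hge := minpair_ge (q1'' ++ q2'') n hlenb
                  (fun c hc => hlbn c (hsub2 c hc))
                linarith

-- ===== VERDICT (by name: the statement is the Claim_ definition above) =====
theorem solution_spec : Claim_equal_solution := by
  intro scoville K _ _
  unfold Spec_solution solution solution_alt
  exact go_eq _ scoville _ [] K 0 (by simpa using (List.mergeSort_perm scoville _).symm)
    (List.pairwise_mergeSort' (fun a b => a ≤ b) scoville) (by simp) (by simp)
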